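-- pv_equiv track=rewrite | github.com/zhafen/cc | cc/relation.py | parse_relation_for_key_concepts
-- ===== SOURCE A (Python) =====
-- def parse_relation_for_key_concepts( a, word_per_concept=True ):
--     '''Parse a formatted relation for key_concepts, including nested brackets.
--
--     Args:
--         a (str):
--             The written relation you want to parse.
--
--         word_per_concept (bool):
--             If True, limit concepts to one word per concept, and break down
--             multi-word concepts (including nested concepts) into individuals.
--
--     Returns:
--         list of strs:
--             The key concepts contained in the relation.
--     '''
--
--     # Parse key concepts, including nested brackets
--     key_concepts = []
--     stack = []
--     nesting = 0
--     for i, char in enumerate( a ):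
--         if char == '[':
--             nesting += 1
--             stack.append( i )
--         elif char == ']' and stack:
--             nesting -= 1
--             start = stack.pop()
--             key_concept = a[start+1:i]
--             key_concept = key_concept.replace( '[', '' )
--             key_concept = key_concept.replace( ']', '' )
--
--             if word_per_concept:
--                 # Only include top level, which is broken up.
--                 if nesting == 0:
--                     kcs = key_concept.split( ' ' )
--                     [ key_concepts.append( kc ) for kc in kcs ]
--
--             else:
--                 key_concepts.append( key_concept )
--
--     return key_concepts
-- ===== SOURCE B (Python) =====
-- def parse_relation_for_key_concepts( a, word_per_concept=True ):
--     """Recursive-descent parse: walk one bracket group at a time, returning its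
--     bracket-free content, the resume position, whether it was closed, and the
--     contents of the matched pairs strictly inside it (in closing order)."""
--
--     def walk(i):
--         # body of a bracket group starting at i (just after its '[')
--         buf = []
--         ems = []
--         n = len(a)
--         while i < n:
--             c = a[i]
--             if c == ']':
--                 return ''.join(buf), i + 1, True, ems
--             if c == '[':
--                 inner, i, matched, e = walk(i + 1)
--                 buf.append(inner)
--                 ems.extend(e)
--                 if matched:
--                     ems.append(inner)
--             else:
--                 buf.append(c)
--                 i += 1
--         return ''.join(buf), i, False, ems
--
--     out = []
--     i = 0
--     n = len(a)
--     while i < n: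
--         if a[i] == '[':
--             content, i, matched, ems = walk(i + 1)
--             if word_per_concept:
--                 if matched:
--                     out.extend(content.split(' '))
--             else:
--                 out.extend(ems)
--                 if matched:
--                     out.append(content)
--         else:
--             i += 1
--     return out
-- ===== Notes on version B (the rewrite author's own statement) =====
-- stated objective: alternative
-- what changed: B replaces A's single indexed loop with an opening-index stack, slicing and replace() passes by a recursive-descent parser: a walk function parses one bracket group at a time, building its bracket-free content directly and returning the resume position, whether the group was closed, and the inner matched contents, with a top-level driver doing the emission.
import Mathlib
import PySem

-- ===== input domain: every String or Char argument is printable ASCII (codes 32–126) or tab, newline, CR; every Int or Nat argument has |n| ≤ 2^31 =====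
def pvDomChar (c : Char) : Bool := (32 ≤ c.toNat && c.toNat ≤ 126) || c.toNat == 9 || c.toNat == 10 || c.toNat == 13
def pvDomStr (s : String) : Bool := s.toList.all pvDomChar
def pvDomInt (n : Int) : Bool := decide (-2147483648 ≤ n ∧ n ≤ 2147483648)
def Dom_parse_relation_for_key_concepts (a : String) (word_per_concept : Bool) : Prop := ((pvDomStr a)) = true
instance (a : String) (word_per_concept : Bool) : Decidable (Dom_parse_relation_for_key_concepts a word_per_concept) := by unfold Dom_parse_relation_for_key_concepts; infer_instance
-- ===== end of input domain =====

-- B replaces A's index-stack + slicing/replace loop with a recursive-descent parser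
-- (objective: alternative, a genuinely different algorithm of similar cost).

-- ===== PORT A =====
-- one loop step of A: state = (key_concepts, stack of opening indices, nesting)
def pvStepA (la : List Char) (word_per_concept : Bool)
    (st : List (List Char) × List Int × Int) (p : Int × Char) :
    List (List Char) × List Int × Int :=
  match st, p with
  | (kcs, stack, nesting), (i, ch) =>
    if ch = '[' then (kcs, i :: stack, nesting + 1)
    else if ch = ']' then
      match stack with
      | [] => (kcs, [], nesting)          -- Python's "and stack" guard fails: no change
      | start :: rest =>
        let nesting' := nesting - 1
        let kc0 := PySem.List.slice la (some (start + 1)) (some i)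
        let kc1 := PySem.Chars.replace kc0 ['['] []
        let kc  := PySem.Chars.replace kc1 [']'] []
        if word_per_concept then
          if nesting' = 0 then (kcs ++ PySem.Chars.splitOn kc [' '], rest, nesting')
          else (kcs, rest, nesting')
        else (kcs ++ [kc], rest, nesting')
    else (kcs, stack, nesting)

def parse_relation_for_key_concepts (a : String) (word_per_concept : Bool) : List String :=
  (((PySem.List.enumerate a.toList 0).foldl (pvStepA a.toList word_per_concept) ([], [], 0)).1).map
    (fun cs => String.ofList cs)

-- ===== PORT B =====
-- Source B's walk(i): parse the body of one bracket group (entered just after its '[');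
-- returns (content with brackets already excluded, rest of the input after the matching ']',
-- whether the group was closed, contents of the matched pairs strictly inside, in closing order).
-- The fuel argument is a pure totality guard (fuel > length never runs out); the value is Source B's.
def pvWalk : Nat → List Char → List Char → List Char × List Char × Bool × List (List Char)
  | 0, cs, buf => (buf, cs, false, [])
  | fuel + 1, cs, buf =>
    match cs with
    | [] => (buf, [], false, [])
    | c :: t =>
      if c = ']' then (buf, t, true, [])
      else if c = '[' then
        match pvWalk fuel t [] with
        | (i0, r1, m1, e1) =>
          match pvWalk fuel r1 (buf ++ i0) with
          | (c2, r2, m2, e2) => (c2, r2, m2, e1 ++ (if m1 then [i0] else []) ++ e2)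
      else pvWalk fuel t (buf ++ [c])

-- Source B's driver loop over the whole string (fuel is again only a totality guard)
def pvDrive (word_per_concept : Bool) : Nat → List Char → List (List Char)
  | 0, _ => []
  | fuel + 1, cs =>
    match cs with
    | [] => []
    | c :: t =>
      if c = '[' then
        match pvWalk (t.length + 1) t [] with
        | (content, rest, matched, ems) =>
          (if word_per_concept then
             (if matched then PySem.Chars.splitOn content [' '] else [])
           else ems ++ (if matched then [content] else [])) ++ pvDrive word_per_concept fuel rest
      else pvDrive word_per_concept fuel t

def parse_relation_for_key_concepts_alt (a : String) (word_per_concept : Bool) : List String :=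
  (pvDrive word_per_concept (a.toList.length + 1) a.toList).map (fun cs => String.ofList cs)

-- ===== PRECONDITION & SPEC =====
def Spec_parse_relation_for_key_concepts (a : String) (word_per_concept : Bool) (out : List String) : Prop := out = parse_relation_for_key_concepts_alt a word_per_concept
instance (a : String) (word_per_concept : Bool) (out : List String) : Decidable (Spec_parse_relation_for_key_concepts a word_per_concept out) := by unfold Spec_parse_relation_for_key_concepts; infer_instance

-- ===== CLAIM (what is proved, stated in full; the proofs are below) =====
def Claim_equal_parse_relation_for_key_concepts : Prop := ∀ (a : String) (word_per_concept : Bool), Dom_parse_relation_for_key_concepts a word_per_concept → Spec_parse_relation_for_key_concepts a word_per_concept (parse_relation_for_key_concepts a word_per_concept)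

-- ===== LEMMAS AND PROOFS =====

-- proof-side intermediate machine: the stack-of-accumulators fold.  A is proved equal to
-- this fold (pv_loop), and the fold is proved equal to B's recursive descent (pv_L2).
def pvStepB (word_per_concept : Bool)
    (st : List (List Char) × List (List Char)) (ch : Char) :
    List (List Char) × List (List Char) :=
  match st with
  | (kcs, stack) =>
    if ch = '[' then (kcs, [] :: stack)
    else if ch = ']' then
      match stack with
      | [] => (kcs, [])
      | content :: rest =>
        if word_per_concept then
          if rest = [] then (kcs ++ PySem.Chars.splitOn content [' '], rest)
          else (kcs, rest)
        else (kcs ++ [content], rest)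
    else (kcs, stack.map (fun acc => acc ++ [ch]))

-- A's replace(x, '') with a one-char pattern is a filter
lemma pv_replace_go_filter (b : Char) :
    ∀ (fuel : Nat) (l acc : List Char), l.length ≤ fuel →
      PySem.Chars.replace.go [b] [] fuel l acc = acc.reverse ++ l.filter (· ≠ b) := by
  intro fuel
  induction fuel with
  | zero => intro l acc h; simp at h; simp [h, PySem.Chars.replace.go]
  | succ n ih =>
    intro l acc h
    cases l with
    | nil => simp [PySem.Chars.replace.go]
    | cons c t =>
      simp only [PySem.Chars.replace.go, List.isPrefixOf]
      by_cases hc : b = c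
      · subst hc
        simp only [BEq.rfl, Bool.true_and, if_pos, List.isPrefixOf_nil_left,
          List.reverse_nil, List.nil_append, List.length_cons, List.length_nil,
          Nat.zero_add, List.drop_succ_cons, List.drop_zero]
        rw [ih t acc (by simpa using Nat.le_of_succ_le_succ h)]
        simp
      · have : (b == c) = false := by simp [hc]
        simp only [this, Bool.false_and, if_neg Bool.false_ne_true]
        rw [ih t (c :: acc) (by simpa using Nat.le_of_succ_le_succ h)]
        simp [Ne.symm hc]

lemma pv_replace_filter (cs : List Char) (b : Char) :
    PySem.Chars.replace cs [b] [] = cs.filter (· ≠ b) := by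
  simp only [PySem.Chars.replace, List.isEmpty_cons, Bool.false_eq_true, if_false]
  simpa using pv_replace_go_filter b cs.length cs [] le_rfl

-- the content A recovers for the pair opened at index j, after stripping brackets
def pvStrip (cs : List Char) : List Char :=
  (cs.filter (· ≠ '[')).filter (· ≠ ']')

-- main loop invariant: A's fold over the remaining suffix (with prefix p already read)
-- produces the same key_concepts as the accumulator-stack fold, when that stack holds the
-- stripped texts since each recorded opening index
lemma pv_loop (word_per_concept : Bool) :
    ∀ (s p : List Char) (kcs : List (List Char)) (stackA : List Int),
      (∀ j ∈ stackA, 0 ≤ j ∧ j.toNat < p.length) →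
      ((PySem.List.enumerate s (p.length : Int)).foldl
          (pvStepA (p ++ s) word_per_concept) (kcs, stackA, (stackA.length : Int))).1
        = (s.foldl (pvStepB word_per_concept)
            (kcs, stackA.map (fun j => pvStrip (p.drop (j.toNat + 1))))).1 := by
  intro s
  induction s with
  | nil => intro p kcs stackA _; simp [PySem.List.enumerate]
  | cons c t ih =>
    intro p kcs stackA hst
    rw [PySem.List.enumerate_cons]
    simp only [List.foldl_cons]
    by_cases h1 : c = '['
    · -- '[' : A pushes the opening index, B pushes an empty accumulator
      subst h1
      simp only [pvStepA, pvStepB, if_pos rfl, eq_self_iff_true, if_true]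
      have := ih (p ++ ['[']) kcs (((p.length : Int)) :: stackA)
        (by
          intro j hj
          rcases List.mem_cons.mp hj with h | h
          · subst h; constructor <;> simp
          · exact ⟨(hst j h).1, by have := (hst j h).2; simp; omega⟩)
      simp only [List.length_append, List.length_cons, List.length_nil,
        List.append_assoc, List.singleton_append, Nat.cast_add, Nat.cast_one,
        Nat.cast_zero, zero_add, List.map_cons] at this
      rw [this]
      have hmap : pvStrip (List.drop ((p.length : Int).toNat + 1) (p ++ ['['])) = [] := by
        simp [pvStrip, List.drop_append_of_le_length]
      rw [hmap]
      have hmap2 : List.map (fun j => pvStrip (List.drop (j.toNat + 1) (p ++ ['[']))) stackA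
          = List.map (fun j => pvStrip (List.drop (j.toNat + 1) p)) stackA := by
        apply List.map_congr_left
        intro j hj
        have hjp := (hst j hj).2
        simp only [pvStrip]
        rw [List.drop_append_of_le_length (by omega)]
        simp [List.filter_append]
      rw [hmap2]
    · by_cases h2 : c = ']'
      · -- ']' : A pops an index and slices out the pair, B pops the accumulated content
        subst h2
        simp only [pvStepA, pvStepB, if_neg h1, eq_self_iff_true, if_true]
        cases stackA with
        | nil =>
          simp only [List.map_nil, List.length_nil, Nat.cast_zero]
          have := ih (p ++ [']']) kcs [] (by simp)
          simp only [List.length_append, List.length_cons, List.length_nil,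
            List.append_assoc, List.singleton_append, Nat.cast_add, Nat.cast_one,
            Nat.cast_zero, zero_add, List.map_nil] at this
          exact this
        | cons start rest =>
          have hs0 : 0 ≤ start := (hst start List.mem_cons_self).1
          have hs1 : start.toNat < p.length := (hst start List.mem_cons_self).2
          -- the slice A takes is exactly the prefix text after the opening bracket
          have hslice : PySem.List.slice (p ++ ']' :: t) (some (start + 1)) (some (p.length : Int))
              = p.drop (start.toNat + 1) := by
            rw [PySem.List.slice_toNat _ (by omega) (by omega)]
            have h1' : (start + 1).toNat = start.toNat + 1 := by omega
            have h2' : ((p.length : Int)).toNat = p.length := by omega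
            rw [h1', h2', List.drop_append_of_le_length (by omega)]
            exact List.take_left' (by simp)
          have hkc : PySem.Chars.replace (PySem.Chars.replace
                (PySem.List.slice (p ++ ']' :: t) (some (start + 1)) (some (p.length : Int)))
                ['['] []) [']'] [] = pvStrip (List.drop (start.toNat + 1) p) := by
            rw [hslice, pv_replace_filter, pv_replace_filter]; rfl
          have hrest : ∀ j ∈ rest, 0 ≤ j ∧ j.toNat < (p ++ [']']).length := by
            intro j hj
            have := hst j (List.mem_cons_of_mem _ hj)
            exact ⟨this.1, by simp; omega⟩
          have hmap2 : List.map (fun j => pvStrip (List.drop (j.toNat + 1) (p ++ [']']))) rest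
              = List.map (fun j => pvStrip (List.drop (j.toNat + 1) p)) rest := by
            apply List.map_congr_left
            intro j hj
            have hjp := (hst j (List.mem_cons_of_mem _ hj)).2
            simp only [pvStrip]
            rw [List.drop_append_of_le_length (by omega)]
            simp [List.filter_append]
          have hlen : ((start :: rest).length : Int) - 1 = (rest.length : Int) := by
            simp
          have hnest : (((start :: rest).length : Int) - 1 = 0) ↔ rest = [] := by
            rw [hlen]; simp [List.length_eq_zero_iff]
          have hmapnil : (List.map (fun j => pvStrip (List.drop (j.toNat + 1) p)) rest = []) ↔ rest = [] := by
            simp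
          simp only [List.map_cons, hkc, hlen]
          by_cases hw : word_per_concept = true
          · subst hw
            simp only [if_pos rfl]
            by_cases hr : rest = []
            · subst hr
              simp only [List.length_nil, Nat.cast_zero, List.map_nil, if_pos rfl]
              have := ih (p ++ [']'])
                (kcs ++ PySem.Chars.splitOn (pvStrip (List.drop (start.toNat + 1) p)) [' ']) [] (by simp)
              simp only [List.length_append, List.length_cons, List.length_nil,
                List.append_assoc, List.singleton_append, Nat.cast_add, Nat.cast_one,
                Nat.cast_zero, zero_add, List.map_nil] at this
              exact this
            · have hrne : ¬(((rest.length : Nat) : Int) = 0) := by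
                simpa [List.length_eq_zero_iff] using hr
              have hrne2 : ¬(List.map (fun j => pvStrip (List.drop (j.toNat + 1) p)) rest = []) := by
                simpa using hr
              rw [if_neg hrne, if_neg hrne2]
              have := ih (p ++ [']']) kcs rest hrest
              simp only [List.length_append, List.length_cons, List.length_nil,
                List.append_assoc, List.singleton_append, Nat.cast_add, Nat.cast_one,
                Nat.cast_zero, zero_add] at this
              rw [hmap2] at this
              exact this
          · simp only [Bool.not_eq_true] at hw
            subst hw
            simp only [Bool.false_eq_true, if_false]
            have := ih (p ++ [']'])
              (kcs ++ [pvStrip (List.drop (start.toNat + 1) p)]) rest hrest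
            simp only [List.length_append, List.length_cons, List.length_nil,
              List.append_assoc, List.singleton_append, Nat.cast_add, Nat.cast_one,
              Nat.cast_zero, zero_add] at this
            rw [hmap2] at this
            exact this
      · -- ordinary character: A leaves its state alone, B appends c to every accumulator
        simp only [pvStepA, pvStepB, if_neg h1, if_neg h2]
        have := ih (p ++ [c]) kcs stackA
          (fun j hj => ⟨(hst j hj).1, by have := (hst j hj).2; simp; omega⟩)
        simp only [List.length_append, List.length_cons, List.length_nil,
          List.append_assoc, List.singleton_append, Nat.cast_add, Nat.cast_one,
          Nat.cast_zero, zero_add] at this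
        have hmap : List.map (fun j => pvStrip (List.drop (j.toNat + 1) (p ++ [c]))) stackA
            = List.map ((fun acc => acc ++ [c]) ∘ (fun j => pvStrip (List.drop (j.toNat + 1) p))) stackA := by
          apply List.map_congr_left
          intro j hj
          have hjp := (hst j hj).2
          simp only [Function.comp_apply, pvStrip]
          rw [List.drop_append_of_le_length (by omega)]
          simp [List.filter_append, h1, h2]
        rw [this, hmap, List.map_map]

-- the rest returned by walk is a suffix bound
lemma pvWalk_rest_le : ∀ (fuel : Nat) (cs buf : List Char),
    (pvWalk fuel cs buf).2.1.length ≤ cs.length := by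
  intro fuel
  induction fuel with
  | zero => intro cs buf; simp [pvWalk]
  | succ n ih =>
    intro cs buf
    cases cs with
    | nil => simp [pvWalk]
    | cons c t =>
      by_cases h1 : c = ']'
      · subst h1; simp [pvWalk]
      · by_cases h2 : c = '['
        · subst h2
          rcases hW : pvWalk n t [] with ⟨i0, r1, m1, e1⟩
          rcases hC : pvWalk n r1 (buf ++ i0) with ⟨c2, r2, m2, e2⟩
          simp only [pvWalk, if_neg h1, if_pos rfl, if_true, hW, hC, List.length_cons]
          have hA := ih t []
          have hB := ih r1 (buf ++ i0)
          rw [hW] at hA; rw [hC] at hB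
          simp at hA hB; omega
        · simp only [pvWalk, if_neg h1, if_neg h2, List.length_cons]
          have := ih t (buf ++ [c]); omega

-- walk's buffer argument is a pure prefix of the returned content
lemma pvWalk_buf : ∀ (fuel : Nat) (cs buf : List Char),
    pvWalk fuel cs buf = (buf ++ (pvWalk fuel cs []).1, (pvWalk fuel cs []).2) := by
  intro fuel
  induction fuel with
  | zero => intro cs buf; simp [pvWalk]
  | succ n ih =>
    intro cs buf
    cases cs with
    | nil => simp [pvWalk]
    | cons c t =>
      by_cases h1 : c = ']'
      · subst h1; simp [pvWalk]
      · by_cases h2 : c = '['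
        · subst h2
          rcases hW : pvWalk n t [] with ⟨i0, r1, m1, e1⟩
          simp only [pvWalk, if_neg h1, if_pos rfl, hW]
          rw [ih r1 (buf ++ i0), ih r1 ([] ++ i0)]
          simp
        · simp only [pvWalk, if_neg h1, if_neg h2]
          rw [ih t (buf ++ [c]), ih t ([] ++ [c])]
          simp

-- an unclosed group consumes the whole input
lemma pvWalk_unmatched : ∀ (fuel : Nat) (cs buf : List Char),
    (pvWalk fuel cs buf).2.2.1 = false → (pvWalk fuel cs buf).2.1 = [] ∨ fuel ≤ cs.length := by
  intro fuel
  induction fuel with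
  | zero => intro cs buf _; right; simp
  | succ n ih =>
    intro cs buf
    cases cs with
    | nil => intro _; left; simp [pvWalk]
    | cons c t =>
      by_cases h1 : c = ']'
      · subst h1; simp [pvWalk]
      · by_cases h2 : c = '['
        · subst h2
          rcases hW : pvWalk n t [] with ⟨i0, r1, m1, e1⟩
          simp only [pvWalk, if_neg h1, if_pos rfl, hW]
          rcases hC : pvWalk n r1 (buf ++ i0) with ⟨c2, r2, m2, e2⟩
          simp only [if_true]
          intro hm
          have := ih r1 (buf ++ i0)
          rw [hC] at this
          dsimp only at this hm
          rcases this (by simp [hm]) with h | h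
          · left; simpa using h
          · right
            have h1' := pvWalk_rest_le n t []
            rw [hW] at h1'
            simp only [List.length_cons] at *
            omega
        · simp only [pvWalk, if_neg h1, if_neg h2, List.length_cons]
          intro hm
          rcases ih t (buf ++ [c]) hm with h | h
          · left; exact h
          · right; omega

-- what a bracket group contributes to key_concepts
def pvEmitted (word_per_concept : Bool) (stack : List (List Char)) (full : List Char)
    (m : Bool) (ems : List (List Char)) : List (List Char) :=
  if word_per_concept then
    (if m && stack.isEmpty then PySem.Chars.splitOn full [' '] else [])
  else ems ++ (if m then [full] else [])

-- the accumulator-stack fold over one bracket group equals what walk returns for it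
lemma pv_L1 (wpc : Bool) : ∀ (fuel : Nat) (cs : List Char), cs.length < fuel →
    ∀ (kcs : List (List Char)) (buf : List Char) (stack : List (List Char)),
    ((pvWalk fuel cs []).2.2.1 = true →
      cs.foldl (pvStepB wpc) (kcs, buf :: stack)
        = (pvWalk fuel cs []).2.1.foldl (pvStepB wpc)
            (kcs ++ pvEmitted wpc stack (buf ++ (pvWalk fuel cs []).1) true (pvWalk fuel cs []).2.2.2,
             stack.map (fun s => s ++ (pvWalk fuel cs []).1)))
    ∧ ((pvWalk fuel cs []).2.2.1 = false →
      (cs.foldl (pvStepB wpc) (kcs, buf :: stack)).1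
        = kcs ++ pvEmitted wpc stack (buf ++ (pvWalk fuel cs []).1) false (pvWalk fuel cs []).2.2.2) := by
  intro fuel
  induction fuel with
  | zero => intro cs h; omega
  | succ n ih =>
    intro cs h kcs buf stack
    cases cs with
    | nil =>
      constructor
      · intro hm; simp [pvWalk] at hm
      · intro _; cases wpc <;> simp [pvWalk, pvEmitted]
    | cons c t =>
      simp only [List.length_cons] at h
      by_cases h1 : c = ']'
      · subst h1
        have hWhole : pvWalk (n + 1) (']' :: t) [] = ([], t, true, []) := by
          simp [pvWalk]
        rw [hWhole]
        constructor
        · intro _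
          simp only [List.foldl_cons]
          cases wpc
          · simp [pvStepB, pvEmitted]
          · cases stack <;> simp [pvStepB, pvEmitted]
        · intro hm; simp at hm
      · by_cases h2 : c = '['
        · subst h2
          rcases hW : pvWalk n t [] with ⟨i0, r1, m1, e1⟩
          rcases hC : pvWalk n r1 [] with ⟨c2, r2, m2, e2⟩
          have ht : t.length < n := by omega
          have hr1 : r1.length ≤ t.length := by
            have := pvWalk_rest_le n t []; rw [hW] at this; simpa using this
          have hCb : pvWalk n r1 ([] ++ i0) = (([] ++ i0) ++ c2, r2, m2, e2) := by
            rw [pvWalk_buf n r1 ([] ++ i0), hC]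
          have hWhole : pvWalk (n + 1) ('[' :: t) []
              = (i0 ++ c2, r2, m2, e1 ++ (if m1 then [i0] else []) ++ e2) := by
            simp only [pvWalk, if_neg h1, if_pos rfl, if_true, hW, hCb]
            simp
          rw [hWhole]
          dsimp only
          have hpush : pvStepB wpc (kcs, buf :: stack) '[' = (kcs, [] :: buf :: stack) := by
            simp [pvStepB]
          have IH1 := ih t ht kcs [] (buf :: stack)
          rw [hW] at IH1
          dsimp only at IH1
          cases m1 with
          | true =>
            have step1 := IH1.1 rfl
            simp only [List.nil_append, List.map_cons] at step1
            have IH2 := ih r1 (by omega) (kcs ++ pvEmitted wpc (buf :: stack) i0 true e1)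
              (buf ++ i0) (stack.map (fun s => s ++ i0))
            rw [hC] at IH2
            dsimp only at IH2
            constructor
            · intro hm; subst hm
              have step2 := IH2.1 rfl
              simp only [List.foldl_cons, hpush, step1, step2]
              cases wpc <;>
                simp [pvEmitted, List.map_map, Function.comp_def, List.append_assoc, List.isEmpty_map]
            · intro hm; subst hm
              have step2 := IH2.2 rfl
              simp only [List.foldl_cons, hpush, step1, step2]
              cases wpc <;> simp [pvEmitted, List.append_assoc]
          | false =>
            have hr1nil : r1 = [] := by
              have := pvWalk_unmatched n t []
              rw [hW] at this
              rcases this (by simp) with hh | hh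
              · simpa using hh
              · omega
            have hCnil : pvWalk n r1 [] = ([], [], false, []) := by
              subst hr1nil; cases n <;> simp [pvWalk]
            rw [hCnil] at hC
            obtain ⟨hc2, hr2, hm2, he2⟩ : c2 = [] ∧ r2 = [] ∧ m2 = false ∧ e2 = [] := by
              have h' := hC
              simp only [Prod.mk.injEq] at h'
              tauto
            subst hc2; subst hr2; subst hm2; subst he2
            constructor
            · intro hm; simp at hm
            · intro _
              have step1 := IH1.2 rfl
              simp only [List.nil_append] at step1
              simp only [List.foldl_cons, hpush, step1]
              cases wpc <;> simp [pvEmitted]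
        · rcases hW : pvWalk n t [] with ⟨c1, r1, m1, e1⟩
          have hWhole : pvWalk (n + 1) (c :: t) [] = (c :: c1, r1, m1, e1) := by
            simp only [pvWalk, if_neg h1, if_neg h2]
            rw [pvWalk_buf n t ([] ++ [c]), hW]
            simp
          rw [hWhole]
          dsimp only
          have hstep : pvStepB wpc (kcs, buf :: stack) c
              = (kcs, (buf ++ [c]) :: stack.map (fun s => s ++ [c])) := by
            simp [pvStepB, if_neg h2, if_neg h1]
          have IH := ih t (by omega) kcs (buf ++ [c]) (stack.map (fun s => s ++ [c]))
          rw [hW] at IH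
          dsimp only at IH
          cases m1 with
          | true =>
            constructor
            · intro _
              have step1 := IH.1 rfl
              simp only [List.foldl_cons, hstep, step1]
              cases wpc <;>
                simp [pvEmitted, List.map_map, Function.comp_def, List.append_assoc, List.isEmpty_map]
            · intro hm; simp at hm
          | false =>
            constructor
            · intro hm; simp at hm
            · intro _
              have step1 := IH.2 rfl
              simp only [List.foldl_cons, hstep, step1]
              cases wpc <;> simp [pvEmitted]

-- the accumulator-stack fold at top level equals B's driver
lemma pv_L2 (wpc : Bool) : ∀ (fuel : Nat) (cs : List Char), cs.length < fuel →
    ∀ (kcs : List (List Char)),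
    (cs.foldl (pvStepB wpc) (kcs, [])).1 = kcs ++ pvDrive wpc fuel cs := by
  intro fuel
  induction fuel with
  | zero => intro cs h; omega
  | succ n ih =>
    intro cs h kcs
    cases cs with
    | nil => simp [pvDrive]
    | cons c t =>
      simp only [List.length_cons] at h
      by_cases hc : c = '['
      · subst hc
        rcases hW : pvWalk (t.length + 1) t [] with ⟨c0, r, m, e⟩
        have hr_le : r.length ≤ t.length := by
          have := pvWalk_rest_le (t.length + 1) t []; rw [hW] at this; simpa using this
        have L := pv_L1 wpc (t.length + 1) t (by omega) kcs [] []
        rw [hW] at L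
        dsimp only at L
        have hpush : pvStepB wpc (kcs, ([] : List (List Char))) '[' = (kcs, [[]]) := by
          simp [pvStepB]
        have hdrive : pvDrive wpc (n + 1) ('[' :: t)
            = (if wpc then (if m then PySem.Chars.splitOn c0 [' '] else [])
               else e ++ (if m then [c0] else [])) ++ pvDrive wpc n r := by
          simp [pvDrive, hW]
        cases m with
        | true =>
          have step1 := L.1 rfl
          simp only [List.nil_append, List.map_nil] at step1
          have step2 := ih r (by omega) (kcs ++ pvEmitted wpc [] c0 true e)
          simp only [List.foldl_cons, hpush, step1, step2, hdrive]
          cases wpc <;> simp [pvEmitted]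
        | false =>
          have hrnil : r = [] := by
            have := pvWalk_unmatched (t.length + 1) t []
            rw [hW] at this
            rcases this (by simp) with hh | hh
            · simpa using hh
            · omega
          have step1 := L.2 rfl
          simp only [List.nil_append, List.map_nil] at step1
          have hdrivenil : pvDrive wpc n ([] : List Char) = [] := by
            cases n <;> simp [pvDrive]
          simp only [List.foldl_cons, hpush, step1, hdrive, hrnil, hdrivenil]
          cases wpc <;> simp [pvEmitted]
      · have hstep : pvStepB wpc (kcs, ([] : List (List Char))) c = (kcs, []) := by
          by_cases hc2 : c = ']' <;> simp [pvStepB, hc, hc2]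
        have hdrive : pvDrive wpc (n + 1) (c :: t) = pvDrive wpc n t := by
          simp [pvDrive, hc]
        simp only [List.foldl_cons, hstep, hdrive]
        exact ih t (by omega) kcs

-- ===== VERDICT (by name: the statement is the Claim_ definition above) =====
theorem parse_relation_for_key_concepts_spec : Claim_equal_parse_relation_for_key_concepts := by
  intro a wpc _
  unfold Spec_parse_relation_for_key_concepts
  unfold parse_relation_for_key_concepts parse_relation_for_key_concepts_alt
  have h := pv_loop wpc a.toList [] [] []
  simp only [List.nil_append, List.length_nil, Nat.cast_zero, List.map_nil] at h
  rw [h (by simp)]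
  have h2 := pv_L2 wpc (a.toList.length + 1) a.toList (by omega) []
  simp only [List.nil_append] at h2
  rw [h2]
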